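-- pv_equiv track=rewrite | github.com/VetianJzzl/python2 | Midterm/backup.py | even_odd_swap
-- ===== SOURCE A (Python) =====
-- def even_odd_swap(x):
--     if len(x)%2!=0:
--         x = x + ' '
--
--     even_letters = x[0::2]
--     odd_letters  = x[1::2]
--     s=''
--
--     for i in range(len(even_letters)):
--         s = s+odd_letters[i]
--         s = s+even_letters[i]
--
--     return s
-- ===== SOURCE B (Python) =====
-- def even_odd_swap(x):
--     out = []
--     i = 0
--     n = len(x)
--     while i + 1 < n:
--         out.append(x[i + 1])
--         out.append(x[i])
--         i += 2
--     if i < n: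
--         out.append(' ')
--         out.append(x[i])
--     return ''.join(out)
-- ===== Notes on version B (the rewrite author's own statement) =====
-- stated objective: alternative
-- what changed: B replaces A's split into even/odd stride slices plus an index-driven interleaving loop (with string concatenation) by a single while loop that walks the string two characters at a time appending the swapped pair to a list joined once, handling the odd tail (' ' + last char) directly.
import Mathlib
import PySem

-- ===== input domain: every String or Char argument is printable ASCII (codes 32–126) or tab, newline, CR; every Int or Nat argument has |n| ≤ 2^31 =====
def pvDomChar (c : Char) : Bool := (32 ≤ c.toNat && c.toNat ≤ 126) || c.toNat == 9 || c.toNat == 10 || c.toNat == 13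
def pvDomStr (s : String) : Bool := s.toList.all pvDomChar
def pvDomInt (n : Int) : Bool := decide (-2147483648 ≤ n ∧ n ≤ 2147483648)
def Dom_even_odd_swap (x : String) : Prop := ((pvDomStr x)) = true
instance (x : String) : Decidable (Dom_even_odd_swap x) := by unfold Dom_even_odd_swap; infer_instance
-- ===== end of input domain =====

-- B replaces A's even/odd slice split and index-interleaving loop by a single
-- while loop that walks the string two characters at a time, appending the
-- swapped pair directly (objective: alternative decomposition, no slices).

-- ===== PORT A =====
def even_odd_swap (x : String) : String :=
  let cs0 := x.toList
  let cs := if PySem.Int.mod (cs0.length : Int) 2 ≠ 0 then cs0 ++ [' '] else cs0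
  let even_letters := (PySem.List.slice? cs (some 0) none 2).getD []
  let odd_letters := (PySem.List.slice? cs (some 1) none 2).getD []
  let s := (PySem.List.pyRange 0 (even_letters.length : Int) 1).foldl
    (fun s i =>
      (s ++ [PySem.List.pyGetD odd_letters i ' ']) ++ [PySem.List.pyGetD even_letters i ' '])
    []
  String.ofList s

-- ===== PORT B =====
-- the while loop of Source B: index i, accumulator out
def pvAltLoop (cs : List Char) (i : Nat) (out : List Char) : List Char :=
  if i + 1 < cs.length then
    pvAltLoop cs (i + 2)
      ((out ++ [PySem.List.pyGetD cs ((i : Int) + 1) ' ']) ++ [PySem.List.pyGetD cs (i : Int) ' '])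
  else if i < cs.length then
    (out ++ [' ']) ++ [PySem.List.pyGetD cs (i : Int) ' ']
  else out
termination_by cs.length - i

def even_odd_swap_alt (x : String) : String :=
  String.ofList (pvAltLoop x.toList 0 [])

-- ===== PRECONDITION & SPEC =====
def Spec_even_odd_swap (x : String) (out : String) : Prop := out = even_odd_swap_alt x
instance (x : String) (out : String) : Decidable (Spec_even_odd_swap x out) := by unfold Spec_even_odd_swap; infer_instance

-- ===== CLAIM (what is proved, stated in full; the proofs are below) =====
def Claim_equal_even_odd_swap : Prop := ∀ (x : String), Dom_even_odd_swap x → Spec_even_odd_swap x (even_odd_swap x)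

-- ===== LEMMAS AND PROOFS =====

-- the pairwise swap both programs compute, as a structural recursion
def pvPS : List Char → List Char
  | a :: b :: r => b :: a :: pvPS r
  | [a] => [' ', a]
  | [] => []

-- B's loop is pvPS on the remaining suffix
lemma pvAltLoop_eq (cs : List Char) (i : Nat) (out : List Char) :
    pvAltLoop cs i out = out ++ pvPS (cs.drop i) := by
  fun_induction pvAltLoop cs i out with
  | case1 i out h ih =>
    rw [ih]
    have h1 : i < cs.length := by omega
    have h2 : i + 1 < cs.length := h
    rw [← List.getElem_cons_drop h1, ← List.getElem_cons_drop h2]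
    simp [pvPS, PySem.List.pyGetD_of_nonneg _ _ (by omega : (0:Int) ≤ (i:Int)),
      PySem.List.pyGetD_of_nonneg _ _ (by omega : (0:Int) ≤ (i:Int)+1),
      List.getD_eq_getElem?_getD, List.getElem?_eq_getElem h1, List.getElem?_eq_getElem h2]
  | case2 i out h1 h2 =>
    have h : i < cs.length := h2
    rw [← List.getElem_cons_drop h]
    have hd : cs.drop (i+1) = [] := by
      have : cs.length ≤ i + 1 := by omega
      simp [List.drop_eq_nil_iff, this]
    simp [pvPS, hd, PySem.List.pyGetD_of_nonneg _ _ (by omega : (0:Int) ≤ (i:Int)),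
      List.getD_eq_getElem?_getD, List.getElem?_eq_getElem h]
  | case3 i out h1 h2 =>
    have : cs.drop i = [] := by simp [List.drop_eq_nil_iff]; omega
    simp [pvPS, this]

-- filterMap of in-range getElem? is map of getD
lemma pvFilterMap_map (cs : List Char) (f : Nat → Nat) (c : Nat)
    (h : ∀ k < c, f k < cs.length) :
    (List.range c).filterMap (fun k => cs[f k]?) =
      (List.range c).map (fun k => cs.getD (f k) ' ') := by
  induction c with
  | zero => simp
  | succ c ih =>
    rw [List.range_succ]
    simp only [List.filterMap_append, List.map_append]
    rw [ih (fun k hk => h k (by omega))]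
    have hc : f c < cs.length := h c (by omega)
    simp [List.getElem?_eq_getElem hc, List.getD_eq_getElem?_getD]

-- closed form of cs[0::2]
lemma pvSliceE (cs : List Char) :
    PySem.List.slice? cs (some 0) none 2 =
      some ((List.range ((cs.length + 1) / 2)).map (fun k => cs.getD (2 * k) ' ')) := by
  simp only [PySem.List.slice?, PySem.List.sliceIndices]
  norm_num
  have hcount : (if 0 < cs.length then (((cs.length:Int) + 2 - 1) / 2).toNat else 0) = (cs.length + 1) / 2 := by
    split_ifs with h <;> omega
  rw [hcount, pvFilterMap_map cs (fun k => (2 * (k:Int)).toNat) _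
    (by intro k hk; show (2 * (k:Int)).toNat < cs.length; omega)]
  apply List.map_congr_left
  intro k hk
  have h2 : ((2 * (k:Int)).toNat) = 2 * k := by omega
  rw [h2, List.getD_eq_getElem?_getD]

-- closed form of cs[1::2]
lemma pvSliceO (cs : List Char) :
    PySem.List.slice? cs (some 1) none 2 =
      some ((List.range (cs.length / 2)).map (fun k => cs.getD (2 * k + 1) ' ')) := by
  cases cs with
  | nil => rfl
  | cons a r =>
    simp only [PySem.List.slice?, PySem.List.sliceIndices]
    norm_num
    have hcount : (if 0 < r.length then (((r.length:Int) + 2 - 1) / 2).toNat else 0) = (r.length + 1) / 2 := by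
      split_ifs with h <;> omega
    rw [hcount, pvFilterMap_map (a :: r) (fun k => (1 + 2 * (k:Int)).toNat) _
      (by intro k hk; show (1 + 2 * (k:Int)).toNat < (a :: r).length; simp; omega)]
    apply List.map_congr_left
    intro k hk
    have h2 : ((1 + 2 * (k:Int)).toNat) = 2 * k + 1 := by omega
    rw [h2, List.getD_eq_getElem?_getD]
    rfl

-- the padded string
def pvPad (cs : List Char) : List Char :=
  if cs.length % 2 ≠ 0 then cs ++ [' '] else cs

lemma pvPad_len (cs : List Char) : (pvPad cs).length = 2 * ((cs.length + 1) / 2) := by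
  unfold pvPad
  split_ifs with h
  · simp only [List.length_append, List.length_cons, List.length_nil]
    omega
  · omega

lemma pvPad_cons₂ (a b : Char) (r : List Char) :
    pvPad (a :: b :: r) = a :: b :: pvPad r := by
  unfold pvPad
  have : (a :: b :: r).length % 2 = r.length % 2 := by simp; omega
  rw [this]
  split_ifs <;> simp

-- the interleaving A computes equals pvPS on the original string
lemma pvMain (cs : List Char) :
    (List.range ((cs.length + 1) / 2)).flatMap
      (fun k => [(pvPad cs).getD (2 * k + 1) ' ', (pvPad cs).getD (2 * k) ' ']) = pvPS cs := by
  fun_induction pvPS cs with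
  | case1 a b r ih =>
    have hm : ((a :: b :: r).length + 1) / 2 = (r.length + 1) / 2 + 1 := by simp; omega
    rw [hm, List.range_succ_eq_map, pvPad_cons₂]
    simp only [List.flatMap_cons, List.flatMap_map]
    simp only [Nat.succ_eq_add_one]
    have hb : ∀ k : Nat, (a :: b :: pvPad r).getD (2 * (k + 1) + 1) ' ' = (pvPad r).getD (2 * k + 1) ' ' := by
      intro k
      have : 2 * (k + 1) + 1 = (2 * k + 1) + 1 + 1 := by omega
      rw [this, List.getD_cons_succ, List.getD_cons_succ]
    have he : ∀ k : Nat, (a :: b :: pvPad r).getD (2 * (k + 1)) ' ' = (pvPad r).getD (2 * k) ' ' := by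
      intro k
      have : 2 * (k + 1) = (2 * k) + 1 + 1 := by omega
      rw [this, List.getD_cons_succ, List.getD_cons_succ]
    simp only [hb, he]
    rw [ih]
    simp
  | case2 a =>
    simp [pvPad]
  | case3 =>
    simp [pvPad]

-- ===== VERDICT (by name: the statement is the Claim_ definition above) =====
theorem even_odd_swap_spec : Claim_equal_even_odd_swap := by
  intro x _
  show even_odd_swap x = even_odd_swap_alt x
  unfold even_odd_swap even_odd_swap_alt
  rw [pvAltLoop_eq]
  simp only [List.drop_zero, List.nil_append]
  have hpad : (if PySem.Int.mod ((x.toList.length : Nat) : Int) 2 ≠ 0 then x.toList ++ [' '] else x.toList)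
      = pvPad x.toList := by
    unfold pvPad
    rw [show (2:Int) = ((2:Nat):Int) from rfl, PySem.Int.mod_natCast]
    norm_num
    simp only [show ∀ n : Nat, (((n:Int) % 2 = 1) ↔ (n % 2 = 1)) from fun n => by omega]
  rw [hpad, pvSliceE, pvSliceO]
  simp only [Option.getD_some]
  set n := x.toList.length with hn
  set cs := pvPad x.toList with hcs
  have hlen : cs.length = 2 * ((n + 1) / 2) := pvPad_len x.toList
  set m := (n + 1) / 2 with hm
  have hE : ((List.range ((cs.length + 1) / 2)).map (fun k => cs.getD (2 * k) ' ')).length = m := by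
    simp [hlen]; omega
  rw [hE]
  have hO : cs.length / 2 = m := by omega
  rw [hO]
  have hE2 : (cs.length + 1) / 2 = m := by omega
  rw [hE2]
  refine congrArg String.ofList ?_
  rw [PySem.List.pyRange_zero_natCast, List.foldl_map]
  have hfold := PySem.List.foldl_append_eq_flatMap
    (g := fun k : Nat =>
      [((List.range m).map (fun k => cs.getD (2 * k + 1) ' ')).getD k ' ',
       ((List.range m).map (fun k => cs.getD (2 * k) ' ')).getD k ' '])
    (l := List.range m) (acc := ([] : List Char))
  simp only [List.nil_append] at hfold
  have hstep : ∀ (s : List Char) (k : Nat),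
      (s ++ [PySem.List.pyGetD ((List.range m).map (fun k => cs.getD (2 * k + 1) ' ')) ((k:Int)) ' ']) ++
        [PySem.List.pyGetD ((List.range m).map (fun k => cs.getD (2 * k) ' ')) ((k:Int)) ' ']
      = s ++ [((List.range m).map (fun k => cs.getD (2 * k + 1) ' ')).getD k ' ',
              ((List.range m).map (fun k => cs.getD (2 * k) ' ')).getD k ' '] := by
    intro s k
    rw [PySem.List.pyGetD_natCast, PySem.List.pyGetD_natCast]
    simp
  calc (List.range m).foldl
        (fun (s : List Char) (k : Nat) =>
          (s ++ [PySem.List.pyGetD ((List.range m).map (fun k => cs.getD (2 * k + 1) ' ')) ((k:Int)) ' ']) ++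
            [PySem.List.pyGetD ((List.range m).map (fun k => cs.getD (2 * k) ' ')) ((k:Int)) ' ']) []
      = (List.range m).foldl
          (fun (s : List Char) (k : Nat) => s ++ [((List.range m).map (fun k => cs.getD (2 * k + 1) ' ')).getD k ' ',
            ((List.range m).map (fun k => cs.getD (2 * k) ' ')).getD k ' ']) [] := by
        simp only [hstep]
    _ = (List.range m).flatMap (fun k =>
          [((List.range m).map (fun k => cs.getD (2 * k + 1) ' ')).getD k ' ',
           ((List.range m).map (fun k => cs.getD (2 * k) ' ')).getD k ' ']) := hfold
    _ = (List.range m).flatMap (fun k => [cs.getD (2 * k + 1) ' ', cs.getD (2 * k) ' ']) := by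
        rw [List.flatMap_def, List.flatMap_def]
        congr 1
        apply List.map_congr_left
        intro k hk
        have hkm : k < m := List.mem_range.mp hk
        rw [PySem.List.getD_map_range _ _ _ _ hkm, PySem.List.getD_map_range _ _ _ _ hkm]
    _ = pvPS x.toList := by simp only [hcs, hm, hn]; exact pvMain x.toList
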